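-- pv_equiv track=rewrite | github.com/chenmingxiang110/avatar-generator-2 | lib/utils/data_process.py | point_perpendicularize
-- ===== SOURCE A (Python) =====
-- import copy
--
-- def point_perpendicularize(points, T_pix, re_sort=False):
--     if len(points)==0:
--         return []
--     points_s = sorted(copy.deepcopy(points), key=lambda x: x[-1], reverse=True) if re_sort else copy.deepcopy(points)
--     res = [points_s[0]]
--     for pt in points_s[1:]:
--         lock_0 = False
--         lock_1 = False
--         for anchor in res:
--             if not lock_0 and abs(pt[0]-anchor[0])<=T_pix:
--                 lock_0 = True
--                 pt[0] = anchor[0]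
--             if not lock_1 and abs(pt[1]-anchor[1])<=T_pix:
--                 lock_1 = True
--                 pt[1] = anchor[1]
--         res.append(pt)
--     return res
-- ===== SOURCE B (Python) =====
-- def _bisect_left(a, x):
--     # CPython's bisect.bisect_left, copied (the bisect module is not importable here)
--     lo, hi = 0, len(a)
--     while lo < hi:
--         mid = (lo + hi) // 2
--         if a[mid] < x:
--             lo = mid + 1
--         else:
--             hi = mid
--     return lo
--
--
-- def _bisect_right(a, x):
--     # CPython's bisect.bisect_right, copied
--     lo, hi = 0, len(a)
--     while lo < hi:
--         mid = (lo + hi) // 2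
--         if x < a[mid]:
--             hi = mid
--         else:
--             lo = mid + 1
--     return lo
--
--
-- def _snap(vals, T):
--     # Anchor values are kept SORTED BY VALUE in svals; rank[a] is anchor a's
--     # insertion rank.  Each value binary-searches its window [v-T, v+T] in svals
--     # and snaps to the earliest-inserted anchor in the window (min by rank);
--     # if the window is empty the value becomes a new anchor.
--     svals = []
--     rank = {}
--     out = []
--     for v in vals:
--         cands = svals[_bisect_left(svals, v - T):_bisect_right(svals, v + T)]
--         w = min(cands, key=rank.__getitem__) if cands else v
--         out.append(w)
--         if w not in rank:
--             rank[w] = len(rank)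
--             svals.insert(_bisect_left(svals, w), w)
--     return out
--
--
-- def point_perpendicularize(points, T_pix, re_sort=False):
--     if len(points) == 0:
--         return []
--     pts = sorted(points, key=lambda p: p[-1], reverse=True) if re_sort else points
--     col0 = _snap([p[0] for p in pts], T_pix)
--     col1 = _snap([p[1] for p in pts], T_pix)
--     return [[a, b] + list(p[2:]) for a, b, p in zip(col0, col1, pts)]
-- ===== Notes on version B (the rewrite author's own statement) =====
-- stated objective: alternative
-- what changed: Instead of rescanning every previous point row with lock flags, B keeps per axis a value-sorted anchor array plus an insertion-rank map, binary-searches each value's window [v-T, v+T] and snaps to the minimum-rank anchor in that window, then rebuilds the rows from the two snapped columns.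
-- outside the precondition, e.g. on point_perpendicularize([[]], 0, False): A returns [[]], B raises IndexError; on point_perpendicularize([[5]], 3, True): A returns [[5]], B raises IndexError
import Mathlib
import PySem

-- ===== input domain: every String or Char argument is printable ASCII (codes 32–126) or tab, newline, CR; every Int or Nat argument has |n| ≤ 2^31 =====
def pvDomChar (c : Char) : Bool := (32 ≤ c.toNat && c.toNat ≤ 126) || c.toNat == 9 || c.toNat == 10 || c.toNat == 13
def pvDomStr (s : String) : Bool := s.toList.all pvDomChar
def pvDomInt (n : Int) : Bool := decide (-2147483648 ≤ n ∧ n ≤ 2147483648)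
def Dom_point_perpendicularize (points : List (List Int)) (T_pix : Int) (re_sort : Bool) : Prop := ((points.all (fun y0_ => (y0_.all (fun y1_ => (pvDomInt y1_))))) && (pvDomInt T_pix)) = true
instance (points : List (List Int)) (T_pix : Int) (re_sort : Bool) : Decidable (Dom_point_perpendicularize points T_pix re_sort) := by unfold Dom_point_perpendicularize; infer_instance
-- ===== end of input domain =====

-- B replaces A's rescan of all previous point rows with lock flags by, per axis, a value-sorted
-- anchor array + insertion-rank map: each value binary-searches its window [v-T, v+T] and snaps
-- to the minimum-rank anchor there; rows are rebuilt from the two snapped columns.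
-- Neither program mutates the caller's argument (A deepcopies, B builds new rows).

-- ===== PORT A =====
-- one inner-loop step of A: state = (lock_0, lock_1, pt); anchor[j] / pt[j] via pyGet? (total via getD, in range on Pre_)
def ppInnerStep (T : Int) (st : Bool × Bool × List Int) (anchor : List Int) : Bool × Bool × List Int :=
  let l0 := st.1; let l1 := st.2.1; let p := st.2.2
  let s0 : Bool × List Int :=
    if !l0 && decide (|(PySem.List.pyGet? p 0).getD 0 - (PySem.List.pyGet? anchor 0).getD 0| ≤ T) then
      (true, p.set 0 ((PySem.List.pyGet? anchor 0).getD 0))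
    else (l0, p)
  let s1 : Bool × List Int :=
    if !l1 && decide (|(PySem.List.pyGet? s0.2 1).getD 0 - (PySem.List.pyGet? anchor 1).getD 0| ≤ T) then
      (true, s0.2.set 1 ((PySem.List.pyGet? anchor 1).getD 0))
    else (l1, s0.2)
  (s0.1, s1.1, s1.2)

def point_perpendicularize (points : List (List Int)) (T_pix : Int) (re_sort : Bool) : List (List Int) :=
  if points.length = 0 then []
  else
    let points_s := if re_sort then PySem.List.sorted points (fun x => (PySem.List.pyGet? x (-1)).getD 0) true else points
    match points_s with
    | [] => []
    | p0 :: rest =>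
      rest.foldl (fun res pt => res ++ [(res.foldl (ppInnerStep T_pix) (false, false, pt)).2.2]) [p0]

-- ===== PORT B =====
-- _bisect_left/_bisect_right in Source B are verbatim copies of CPython's bisect.bisect_left/right
-- (the module is not importable there); their exact Lean ports are PySem.List.bisectLeft/bisectRight.
-- min(cands, key=rank.__getitem__) → PySem.List.min? (Python's first-minimum tie rule); every
-- candidate is a key of rank, so rank[a] is ported as rank.getD a 0 (KeyError unreachable).
-- one loop step of _snap: state = (svals sorted anchor values, rank : value → insertion rank, out)
def ppStep (T : Int) : (List Int × PySem.Dict Int Int × List Int) → Int → (List Int × PySem.Dict Int Int × List Int)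
  | (svals, rank, out), v =>
    let cands := PySem.List.slice svals (some ((PySem.List.bisectLeft svals (v - T) : Nat) : Int))
                    (some ((PySem.List.bisectRight svals (v + T) : Nat) : Int))
    let w := match PySem.List.min? cands (fun a => rank.getD a 0) with
      | some m => m
      | none => v
    if rank.contains w then (svals, rank, out ++ [w])
    else (PySem.List.insert svals ((PySem.List.bisectLeft svals w : Nat) : Int) w,
          rank.insert w (rank.size : Int), out ++ [w])

def ppSnap (T : Int) (vals : List Int) : List Int :=
  (vals.foldl (ppStep T) ([], PySem.Dict.empty, [])).2.2

def point_perpendicularize_alt (points : List (List Int)) (T_pix : Int) (re_sort : Bool) : List (List Int) :=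
  if points.length = 0 then []
  else
    let pts := if re_sort then PySem.List.sorted points (fun p => (PySem.List.pyGet? p (-1)).getD 0) true else points
    let col0 := ppSnap T_pix (pts.map (fun p => (PySem.List.pyGet? p 0).getD 0))
    let col1 := ppSnap T_pix (pts.map (fun p => (PySem.List.pyGet? p 1).getD 0))
    (col0.zip (col1.zip pts)).map (fun x => [x.1, x.2.1] ++ x.2.2.drop 2)

-- ===== PRECONDITION & SPEC =====
-- Pre_ requires every point to have at least 2 coordinates: on shorter points both programs raise
-- IndexError, except the degenerate one-point input, where A happens to return the short point
-- unchanged while B still raises.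
def Pre_point_perpendicularize (points : List (List Int)) (T_pix : Int) (re_sort : Bool) : Prop :=
  ∀ p ∈ points, 2 ≤ p.length
instance (points : List (List Int)) (T_pix : Int) (re_sort : Bool) : Decidable (Pre_point_perpendicularize points T_pix re_sort) := by unfold Pre_point_perpendicularize; infer_instance

def pvWitness_point_perpendicularize : List (List Int) × Int × Bool := ([[0, 0], [3, 10], [4, 11]], 2, false)

def Spec_point_perpendicularize (points : List (List Int)) (T_pix : Int) (re_sort : Bool) (out : List (List Int)) : Prop := out = point_perpendicularize_alt points T_pix re_sort
instance (points : List (List Int)) (T_pix : Int) (re_sort : Bool) (out : List (List Int)) : Decidable (Spec_point_perpendicularize points T_pix re_sort out) := by unfold Spec_point_perpendicularize; infer_instance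

-- ===== CLAIM (what is proved, stated in full; the proofs are below) =====
def Claim_equal_point_perpendicularize : Prop := ∀ (points : List (List Int)) (T_pix : Int) (re_sort : Bool), Dom_point_perpendicularize points T_pix re_sort → Pre_point_perpendicularize points T_pix re_sort → Spec_point_perpendicularize points T_pix re_sort (point_perpendicularize points T_pix re_sort)

-- ===== LEMMAS AND PROOFS =====

-- column accessors and the "first anchor value in the window, else v" spec
def ppG (j : Nat) (p : List Int) : Int := (PySem.List.pyGet? p (j : Int)).getD 0

def ppFm (T : Int) (anchors : List Int) (v : Int) : Int :=
  match anchors.find? (fun a => decide (|v - a| ≤ T)) with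
  | some a => a
  | none => v

-- the snapped column, anchors accumulated left-to-right
def ppGo (T : Int) (out : List Int) : List Int → List Int
  | [] => out
  | v :: vs => ppGo T (out ++ [ppFm T out v]) vs

-- index-0/1 access on an explicit cons list
theorem ppG0_cons (x y : Int) (t : List Int) : ppG 0 (x :: y :: t) = x := by
  simp [ppG]

theorem ppG1_cons (x y : Int) (t : List Int) : ppG 1 (x :: y :: t) = y := by
  simp [ppG]

-- one step of A's inner loop on a destructured pt
theorem ppInnerStep_cons (T : Int) (l0 l1 : Bool) (x y : Int) (t : List Int) (a : List Int) :
    ppInnerStep T (l0, l1, x :: y :: t) a =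
      (l0 || decide (|x - ppG 0 a| ≤ T),
       l1 || decide (|y - ppG 1 a| ≤ T),
       (if !l0 && decide (|x - ppG 0 a| ≤ T) then ppG 0 a else x) ::
       (if !l1 && decide (|y - ppG 1 a| ≤ T) then ppG 1 a else y) :: t) := by
  have hg0 : (PySem.List.pyGet? a 0).getD 0 = ppG 0 a := rfl
  have hg1 : (PySem.List.pyGet? a 1).getD 0 = ppG 1 a := rfl
  cases l0 <;> cases l1 <;>
    by_cases h0 : |x - ppG 0 a| ≤ T <;> by_cases h1 : |y - ppG 1 a| ≤ T <;>
      simp [ppInnerStep, hg0, hg1, PySem.List.pyGet?_zero_cons, h0, h1, List.set]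

-- A's inner loop, fully characterised on an arbitrary anchor list (pt destructured, Pre_ gives 2 ≤ length)
theorem ppInner_char (T : Int) (anchors : List (List Int)) :
    ∀ (l0 l1 : Bool) (x y : Int) (t : List Int),
      (anchors.foldl (ppInnerStep T) (l0, l1, x :: y :: t)).2.2 =
        (if l0 then x else ppFm T (anchors.map (ppG 0)) x) ::
        (if l1 then y else ppFm T (anchors.map (ppG 1)) y) :: t := by
  induction anchors with
  | nil => intro l0 l1 x y t; simp [ppFm]
  | cons a as ih =>
    intro l0 l1 x y t
    rw [List.foldl_cons, ppInnerStep_cons, ih]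
    simp only [List.map_cons]
    cases l0 <;> cases l1 <;>
      by_cases h0 : |x - ppG 0 a| ≤ T <;> by_cases h1 : |y - ppG 1 a| ≤ T <;>
        simp [h0, h1, ppFm]

-- row reconstruction used as the outer-loop invariant
def ppRows : List Int → List Int → List (List Int) → List (List Int)
  | a :: as, b :: bs, p :: ps => ((p.set 0 a).set 1 b) :: ppRows as bs ps
  | _, _, _ => []

theorem ppRows_map_g0 : ∀ (as bs : List Int) (ps : List (List Int)),
    as.length = ps.length → bs.length = ps.length → (∀ p ∈ ps, 2 ≤ p.length) →
    (ppRows as bs ps).map (ppG 0) = as := by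
  intro as
  induction as with
  | nil => intro bs ps h1 _ _; cases bs <;> cases ps <;> simp [ppRows] at *
  | cons a as ih =>
    intro bs ps h1 h2 hlen
    cases bs with
    | nil => cases ps <;> simp at h1 h2
    | cons b bs =>
      cases ps with
      | nil => simp at h1
      | cons p ps =>
        obtain ⟨x, y, t, rfl⟩ : ∃ x y t, p = x :: y :: t := by
          have := hlen p (by simp)
          match p with
          | x :: y :: t => exact ⟨x, y, t, rfl⟩
        simp only [ppRows, List.map_cons]
        rw [ih bs ps (by simpa using h1) (by simpa using h2) (fun q hq => hlen q (by simp [hq]))]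
        simp [List.set, ppG0_cons]

theorem ppRows_map_g1 : ∀ (as bs : List Int) (ps : List (List Int)),
    as.length = ps.length → bs.length = ps.length → (∀ p ∈ ps, 2 ≤ p.length) →
    (ppRows as bs ps).map (ppG 1) = bs := by
  intro as
  induction as with
  | nil => intro bs ps h1 _ _; cases bs <;> cases ps <;> simp [ppRows] at *
  | cons a as ih =>
    intro bs ps h1 h2 hlen
    cases bs with
    | nil => cases ps <;> simp at h1 h2
    | cons b bs =>
      cases ps with
      | nil => simp at h1
      | cons p ps =>
        obtain ⟨x, y, t, rfl⟩ : ∃ x y t, p = x :: y :: t := by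
          have := hlen p (by simp)
          match p with
          | x :: y :: t => exact ⟨x, y, t, rfl⟩
        simp only [ppRows, List.map_cons]
        rw [ih bs ps (by simpa using h1) (by simpa using h2) (fun q hq => hlen q (by simp [hq]))]
        simp [List.set, ppG1_cons]

theorem ppRows_append : ∀ (as bs : List Int) (ps : List (List Int)) (a b : Int) (p : List Int),
    as.length = ps.length → bs.length = ps.length →
    ppRows (as ++ [a]) (bs ++ [b]) (ps ++ [p]) = ppRows as bs ps ++ [(p.set 0 a).set 1 b] := by
  intro as
  induction as with
  | nil => intro bs ps a b p h1 h2; cases bs <;> cases ps <;> simp_all [ppRows]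
  | cons a' as ih =>
    intro bs ps a b p h1 h2
    cases bs with
    | nil => cases ps <;> simp at h1 h2
    | cons b' bs =>
      cases ps with
      | nil => simp at h1
      | cons p' ps =>
        simp only [List.cons_append, ppRows, List.cons_append]
        rw [ih bs ps a b p (by simpa using h1) (by simpa using h2)]

-- A's outer loop keeps res = ppRows of the two snapped-column accumulators
theorem ppOuter_char (T : Int) : ∀ (rest : List (List Int)) (as bs : List Int) (ps : List (List Int)),
    as.length = ps.length → bs.length = ps.length →
    (∀ p ∈ ps, 2 ≤ p.length) → (∀ p ∈ rest, 2 ≤ p.length) →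
    rest.foldl (fun res pt => res ++ [(res.foldl (ppInnerStep T) (false, false, pt)).2.2]) (ppRows as bs ps) =
      ppRows (ppGo T as (rest.map (ppG 0))) (ppGo T bs (rest.map (ppG 1))) (ps ++ rest) := by
  intro rest
  induction rest with
  | nil => intro as bs ps _ _ _ _; simp [ppGo]
  | cons pt rest ih =>
    intro as bs ps h1 h2 hps hrest
    obtain ⟨x, y, t, rfl⟩ : ∃ x y t, pt = x :: y :: t := by
      have := hrest pt (by simp)
      match pt with
      | x :: y :: t => exact ⟨x, y, t, rfl⟩
    simp only [List.foldl_cons]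
    rw [ppInner_char T (ppRows as bs ps) false false x y t]
    simp only [Bool.false_eq_true, if_false]
    rw [ppRows_map_g0 as bs ps h1 h2 hps, ppRows_map_g1 as bs ps h1 h2 hps]
    have hx : ppFm T as x :: ppFm T bs y :: t = (((x :: y :: t).set 0 (ppFm T as x)).set 1 (ppFm T bs y)) := rfl
    rw [hx, ← ppRows_append as bs ps _ _ _ h1 h2]
    rw [ih (as ++ [ppFm T as x]) (bs ++ [ppFm T bs y]) (ps ++ [x :: y :: t])
        (by simp [h1]) (by simp [h2])
        (by intro q hq; rcases List.mem_append.1 hq with h | h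
            · exact hps q h
            · simp at h; subst h; simp)
        (fun q hq => hrest q (by simp [hq]))]
    simp only [List.map_cons, ppGo, ppG0_cons, ppG1_cons]
    simp [List.append_assoc]

-- membership in the bisected window slice svals[bl:br] of a sorted anchor array
theorem ppCands_mem (svals : List Int) (lo hi : Int) (hs : List.Pairwise (· ≤ ·) svals) (a : Int) :
    a ∈ (svals.drop (PySem.List.bisectLeft svals lo)).take
          (PySem.List.bisectRight svals hi - PySem.List.bisectLeft svals lo)
      ↔ a ∈ svals ∧ lo ≤ a ∧ a ≤ hi := by
  obtain ⟨hbl, hbl1, hbl2⟩ := PySem.List.bisectLeft_spec svals lo hs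
  obtain ⟨hbr, hbr1, hbr2⟩ := PySem.List.bisectRight_spec svals hi hs
  set bl := PySem.List.bisectLeft svals lo with hbldef
  set br := PySem.List.bisectRight svals hi with hbrdef
  constructor
  · intro ha
    obtain ⟨i, hilt, hget⟩ := List.mem_iff_getElem.1 ha
    have hlen : i < (svals.drop bl).length := by
      have := hilt; rw [List.length_take] at this; omega
    have hlen' : bl + i < svals.length := by
      rw [List.length_drop] at hlen; omega
    have hgd : (svals.drop bl)[i]'hlen = svals[bl + i]'hlen' := List.getElem_drop
    have hgt : ((svals.drop bl).take (br - bl))[i]'hilt = (svals.drop bl)[i]'hlen := List.getElem_take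
    have hib : i < br - bl := by
      have := hilt; rw [List.length_take] at this; omega
    have ha2 : a = svals[bl + i]'hlen' := by rw [← hget, hgt, hgd]
    refine ⟨by rw [ha2]; exact List.getElem_mem _, ?_, ?_⟩
    · rw [ha2]; exact hbl2 (bl + i) hlen' (by omega)
    · rw [ha2]; exact hbr1 (bl + i) hlen' (by omega)
  · rintro ⟨ha, hlo, hhi⟩
    obtain ⟨j, hjlt, hget⟩ := List.mem_iff_getElem.1 ha
    have hjbl : bl ≤ j := by
      by_contra hlt
      exact absurd hlo (by have := hbl1 j hjlt (by omega); rw [hget] at this; omega)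
    have hjbr : j < br := by
      by_contra hge
      exact absurd hhi (by have := hbr2 j hjlt (by omega); rw [hget] at this; omega)
    have hlen : j - bl < (svals.drop bl).length := by rw [List.length_drop]; omega
    have hilt : j - bl < ((svals.drop bl).take (br - bl)).length := by
      rw [List.length_take, List.length_drop]; omega
    refine List.mem_iff_getElem.2 ⟨j - bl, hilt, ?_⟩
    have hgt : ((svals.drop bl).take (br - bl))[j - bl]'hilt = (svals.drop bl)[j - bl]'hlen := List.getElem_take
    have hgd : (svals.drop bl)[j - bl]'hlen = svals[bl + (j - bl)]'(by omega) := List.getElem_drop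
    rw [hgt, hgd]
    have : bl + (j - bl) = j := by omega
    simp only [this]; exact hget

-- find? returns the member with the smallest index among those satisfying p
theorem ppFind?_min (p : Int → Bool) : ∀ (l : List Int) (f : Int), l.find? p = some f →
    f ∈ l ∧ p f = true ∧ ∀ a ∈ l, p a = true → l.idxOf f ≤ l.idxOf a := by
  intro l
  induction l with
  | nil => intro f h; simp at h
  | cons x t ih =>
    intro f h
    by_cases hp : p x = true
    · rw [List.find?_cons_of_pos hp] at h
      obtain rfl : x = f := by injection h
      exact ⟨by simp, hp, fun a _ _ => by rw [List.idxOf_cons_self]; omega⟩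
    · rw [List.find?_cons_of_neg hp] at h
      obtain ⟨hmem, hpf, hmin⟩ := ih f h
      have hfx : f ≠ x := fun he => hp (he ▸ hpf)
      refine ⟨by simp [hmem], hpf, ?_⟩
      intro a ha hpa
      have hax : a ≠ x := fun he => hp (he ▸ hpa)
      have ha' : a ∈ t := by rcases List.mem_cons.1 ha with h | h; exact absurd h hax; exact h
      rw [List.idxOf_cons, List.idxOf_cons]
      have hbx : (x == f) = false := by simp; intro he; exact hfx he.symm
      have hbx' : (x == a) = false := by simp; intro he; exact hax he.symm
      rw [hbx, hbx']
      simp only [cond_false]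
      have := hmin a ha' hpa
      omega

-- invariant of B's per-axis loop: seen = anchors in insertion order; svals = the same values
-- sorted; rank maps each anchor to its index in seen
def ppInv (seen svals : List Int) (rank : PySem.Dict Int Int) : Prop :=
  List.Pairwise (· < ·) svals ∧ (∀ a : Int, a ∈ svals ↔ a ∈ seen) ∧
  rank.keys = seen ∧ ∀ a ∈ seen, rank.getD a 0 = (seen.idxOf a : Int)

theorem ppSnap_go (T : Int) : ∀ (vs : List Int) (svals : List Int) (rank : PySem.Dict Int Int)
    (seen out : List Int),
    ppInv seen svals rank →
    (∀ u : Int, seen.find? (fun a => decide (|u - a| ≤ T)) = out.find? (fun a => decide (|u - a| ≤ T))) →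
    (vs.foldl (ppStep T) (svals, rank, out)).2.2 = ppGo T out vs := by
  intro vs
  induction vs with
  | nil => intro svals rank seen out _ _; simp [ppGo]
  | cons v vs ih =>
    intro svals rank seen out hinv hfind
    obtain ⟨hsort, hmem, hkeys, hrank⟩ := hinv
    have hsle : List.Pairwise (· ≤ ·) svals := hsort.imp le_of_lt
    set bl := PySem.List.bisectLeft svals (v - T) with hbldef
    set br := PySem.List.bisectRight svals (v + T) with hbrdef
    set cands := (svals.drop bl).take (br - bl) with hcandsdef
    set w := (match PySem.List.min? cands (fun a => rank.getD a 0) with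
      | some m => m
      | none => v) with hwdef
    have hslice : PySem.List.slice svals (some ((bl : Nat) : Int)) (some ((br : Nat) : Int)) = cands :=
      PySem.List.slice_natCast svals bl br
    have hstep : ppStep T (svals, rank, out) v =
        (if rank.contains w then (svals, rank, out ++ [w])
         else (PySem.List.insert svals ((PySem.List.bisectLeft svals w : Nat) : Int) w,
               rank.insert w (rank.size : Int), out ++ [w])) := by
      simp only [ppStep, hslice, ← hbldef, ← hbrdef, ← hwdef]
    have hwinmem : ∀ a, a ∈ cands ↔ a ∈ svals ∧ decide (|v - a| ≤ T) = true := by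
      intro a
      rw [hcandsdef, ppCands_mem svals (v - T) (v + T) hsle a]
      constructor
      · rintro ⟨h1, h2, h3⟩; exact ⟨h1, by rw [decide_eq_true_iff]; rw [abs_sub_le_iff]; omega⟩
      · rintro ⟨h1, h2⟩
        rw [decide_eq_true_iff, abs_sub_le_iff] at h2
        exact ⟨h1, by omega, by omega⟩
    -- the chosen value is the earliest in-window anchor, i.e. ppFm over the column so far
    have hw : w = ppFm T out v := by
      unfold ppFm
      rw [← hfind v]
      cases hf : seen.find? (fun a => decide (|v - a| ≤ T)) with
      | none =>
        have hnone := List.find?_eq_none.1 hf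
        have hc : cands = [] := by
          cases hc : cands with
          | nil => rfl
          | cons c cs =>
            obtain ⟨hcs, hcw⟩ := (hwinmem c).1 (by rw [hc]; simp)
            exact absurd hcw (hnone c ((hmem c).1 hcs))
        rw [hwdef, (PySem.List.min?_eq_none_iff cands _).2 hc]
      | some f =>
        obtain ⟨hfseen, hfwin, hfmin⟩ := ppFind?_min _ seen f hf
        have hfc : f ∈ cands := (hwinmem f).2 ⟨(hmem f).2 hfseen, hfwin⟩
        cases hm : PySem.List.min? cands (fun a => rank.getD a 0) with
        | none => exact absurd ((PySem.List.min?_eq_none_iff cands _).1 hm ▸ hfc) (by simp)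
        | some m =>
          obtain ⟨hmc, hmw⟩ := (hwinmem m).1 (PySem.List.min?_mem hm)
          have hmseen : m ∈ seen := (hmem m).1 hmc
          have h1 : rank.getD m 0 ≤ rank.getD f 0 := PySem.List.min?_isMin hm f hfc
          rw [hrank m hmseen, hrank f hfseen] at h1
          have h2 : seen.idxOf f ≤ seen.idxOf m := hfmin m hmseen hmw
          have hidx : seen.idxOf m = seen.idxOf f := by omega
          have hmf : m = f := by
            have hm' : seen[seen.idxOf m]'(List.idxOf_lt_length_of_mem hmseen) = m :=
              List.getElem_idxOf _
            have hf' : seen[seen.idxOf f]'(List.idxOf_lt_length_of_mem hfseen) = f :=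
              List.getElem_idxOf _
            rw [← hm', ← hf']
            simp only [hidx]
          rw [hwdef, hm, hmf]
    rw [List.foldl_cons, hstep]
    show _ = ppGo T (out ++ [ppFm T out v]) vs
    rw [← hw]
    by_cases hcont : rank.contains w
    · rw [if_pos hcont]
      apply ih svals rank seen (out ++ [w]) ⟨hsort, hmem, hkeys, hrank⟩
      intro u
      rw [List.find?_append, ← hfind u]
      cases hsf : seen.find? (fun a => decide (|u - a| ≤ T)) with
      | some a => simp
      | none =>
        have hws : w ∈ seen := hkeys ▸ (PySem.Dict.contains_iff_mem_keys rank w).1 hcont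
        have hnw : ¬ decide (|u - w| ≤ T) = true := List.find?_eq_none.1 hsf w hws
        simp [List.find?, hnw]
    · rw [if_neg hcont]
      have hwseen : w ∉ seen := fun hws =>
        hcont ((PySem.Dict.contains_iff_mem_keys rank w).2 (hkeys ▸ hws))
      have hwsv : w ∉ svals := fun hws => hwseen ((hmem w).1 hws)
      obtain ⟨hbl', hbl1', hbl2'⟩ := PySem.List.bisectLeft_spec svals w hsle
      set bw := PySem.List.bisectLeft svals w with hbwdef
      have hins : PySem.List.insert svals ((bw : Nat) : Int) w = svals.take bw ++ w :: svals.drop bw :=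
        PySem.List.insert_natCast svals bw w hbl'
      rw [hins]
      -- facts about take/drop members
      have htk : ∀ a ∈ svals.take bw, a < w := by
        intro a ha
        obtain ⟨i, hilt, hget⟩ := List.mem_iff_getElem.1 ha
        have hl : i < svals.length := by have := hilt; rw [List.length_take] at this; omega
        have : (svals.take bw)[i]'hilt = svals[i]'hl := List.getElem_take
        rw [this] at hget
        rw [← hget]
        exact hbl1' i hl (by have := hilt; rw [List.length_take] at this; omega)
      have hdr : ∀ a ∈ svals.drop bw, w < a := by
        intro a ha
        obtain ⟨i, hilt, hget⟩ := List.mem_iff_getElem.1 ha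
        have hl : bw + i < svals.length := by have := hilt; rw [List.length_drop] at this; omega
        have : (svals.drop bw)[i]'hilt = svals[bw + i]'hl := List.getElem_drop
        rw [this] at hget
        have hle : w ≤ a := by rw [← hget]; exact hbl2' (bw + i) hl (by omega)
        have hne : w ≠ a := fun he => hwsv (he ▸ List.mem_of_getElem hget)
        omega
      apply ih _ _ (seen ++ [w]) (out ++ [w])
      · refine ⟨?_, ?_, ?_, ?_⟩
        · -- sortedness of the new anchor array
          rw [List.pairwise_append]
          refine ⟨hsort.sublist (List.take_sublist _ _), ?_, ?_⟩
          · rw [List.pairwise_cons]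
            exact ⟨hdr, hsort.sublist (List.drop_sublist _ _)⟩
          · intro a ha b hb
            rcases List.mem_cons.1 hb with rfl | hb'
            · exact htk a ha
            · exact lt_trans (htk a ha) (hdr b hb')
        · intro a
          constructor
          · intro ha
            rcases List.mem_append.1 ha with h | h
            · exact List.mem_append.2 (Or.inl ((hmem a).1
                (by rw [← List.take_append_drop bw svals]; exact List.mem_append.2 (Or.inl h))))
            · rcases List.mem_cons.1 h with rfl | h'
              · simp
              · exact List.mem_append.2 (Or.inl ((hmem a).1
                  (by rw [← List.take_append_drop bw svals]; exact List.mem_append.2 (Or.inr h'))))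
          · intro ha
            rcases List.mem_append.1 ha with h | h
            · have := (hmem a).2 h
              rw [← List.take_append_drop bw svals] at this
              rcases List.mem_append.1 this with h' | h'
              · exact List.mem_append.2 (Or.inl h')
              · exact List.mem_append.2 (Or.inr (List.mem_cons.2 (Or.inr h')))
            · simp at h; subst h
              exact List.mem_append.2 (Or.inr (by simp))
        · rw [PySem.Dict.keys_insert_of_not_contains rank _ (by simpa using hcont), hkeys]
        · intro a ha
          have hsize : (rank.size : Int) = (seen.length : Int) := by
            have := congrArg List.length hkeys
            simp only [PySem.Dict.keys, List.length_map] at this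
            simp only [PySem.Dict.size, this]
          rcases List.mem_append.1 ha with h | h
          · have hane : a ≠ w := fun he => hwseen (he ▸ h)
            rw [PySem.Dict.getD_insert, if_neg hane, hrank a h, List.idxOf_append]
            rw [if_pos h]
          · simp at h; subst h
            rw [PySem.Dict.getD_insert, if_pos rfl, List.idxOf_append, if_neg hwseen,
                List.idxOf_cons_self, hsize]
            simp
      · intro u
        rw [List.find?_append, List.find?_append, hfind u]
  
-- B's _snap computes the snapped column
theorem ppSnap_eq (T : Int) (vals : List Int) : ppSnap T vals = ppGo T [] vals := by
  unfold ppSnap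
  apply ppSnap_go T vals [] PySem.Dict.empty [] []
  · exact ⟨List.Pairwise.nil, fun a => by simp, PySem.Dict.keys_empty, fun a ha => by simp at ha⟩
  · intro u; rfl

-- a reconstructed row is B's [a, b] ++ p[2:] form when the point has ≥ 2 coordinates
theorem ppRows_eq_zip : ∀ (as bs : List Int) (ps : List (List Int)),
    (∀ p ∈ ps, 2 ≤ p.length) →
    ppRows as bs ps = (as.zip (bs.zip ps)).map (fun x => [x.1, x.2.1] ++ x.2.2.drop 2) := by
  intro as
  induction as with
  | nil => intro bs ps _; cases bs <;> cases ps <;> simp [ppRows]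
  | cons a as ih =>
    intro bs ps hlen
    cases bs with
    | nil => cases ps <;> simp [ppRows]
    | cons b bs =>
      cases ps with
      | nil => simp [ppRows]
      | cons p ps =>
        obtain ⟨x, y, t, rfl⟩ : ∃ x y t, p = x :: y :: t := by
          have := hlen p (by simp)
          match p with
          | x :: y :: t => exact ⟨x, y, t, rfl⟩
        simp [ppRows, ih bs ps (fun q hq => hlen q (by simp [hq])), List.set]

-- ===== VERDICT (by name: the statement is the Claim_ definition above) =====
theorem point_perpendicularize_spec : Claim_equal_point_perpendicularize := by
  intro points T re_sort _ hpre
  unfold Spec_point_perpendicularize point_perpendicularize point_perpendicularize_alt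
  by_cases hlen : points.length = 0
  · simp [hlen]
  · simp only [if_neg hlen]
    set pts := if re_sort then PySem.List.sorted points (fun p => (PySem.List.pyGet? p (-1)).getD 0) true else points with hpts
    have hptsmem : ∀ p ∈ pts, 2 ≤ p.length := by
      intro p hp
      apply hpre
      cases re_sort with
      | false => simpa [hpts] using hp
      | true =>
        exact (PySem.List.mem_sorted points (fun p => (PySem.List.pyGet? p (-1)).getD 0) true p).1
          (by simpa [hpts] using hp)
    have hcol0 : ppSnap T (pts.map (fun p => (PySem.List.pyGet? p 0).getD 0)) = ppGo T [] (pts.map (ppG 0)) :=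
      ppSnap_eq T (pts.map (ppG 0))
    have hcol1 : ppSnap T (pts.map (fun p => (PySem.List.pyGet? p 1).getD 0)) = ppGo T [] (pts.map (ppG 1)) :=
      ppSnap_eq T (pts.map (ppG 1))
    cases hp : pts with
    | nil => simp
    | cons p0 rest =>
      obtain ⟨x, y, t, rfl⟩ : ∃ x y t, p0 = x :: y :: t := by
        have := hptsmem p0 (by simp [hp])
        match p0 with
        | x :: y :: t => exact ⟨x, y, t, rfl⟩
      rw [hp] at hcol0 hcol1
      have hinit : [(x : Int) :: y :: t] = ppRows [x] [y] [x :: y :: t] := rfl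
      show List.foldl (fun res pt => res ++ [(res.foldl (ppInnerStep T) (false, false, pt)).2.2]) [x :: y :: t] rest = _
      rw [hinit, ppOuter_char T rest [x] [y] [x :: y :: t] rfl rfl
          (by intro q hq; simp at hq; subst hq; simp)
          (by intro q hq; exact hptsmem q (by simp [hp, hq]))]
      rw [hcol0, hcol1]
      simp only [List.map_cons, ppG0_cons, ppG1_cons]
      have hgo0 : ppGo T [] (x :: rest.map (ppG 0)) = ppGo T [x] (rest.map (ppG 0)) := by
        simp [ppGo, ppFm]
      have hgo1 : ppGo T [] (y :: rest.map (ppG 1)) = ppGo T [y] (rest.map (ppG 1)) := by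
        simp [ppGo, ppFm]
      rw [hgo0, hgo1]
      rw [show ((x :: y :: t) :: rest : List (List Int)) = [x :: y :: t] ++ rest from rfl]
      apply ppRows_eq_zip
      intro q hq
      rcases List.mem_append.1 hq with h | h
      · simp at h; subst h; simp
      · exact hptsmem q (by simp [hp, h])
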